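-- pv_equiv track=rewrite | github.com/bfs18/rfwave | scripts/libritts_prepare_align.py | remove_space_around_punctuation
-- ===== SOURCE A (Python) =====
-- import string
--
-- def remove_space_around_punctuation(phones):
--     new_phones = []
--     for i in range(len(phones)):
--         if phones[i] in string.punctuation:
--             if len(new_phones) and new_phones[-1] == ' ':
--                 del new_phones[-1]
--         elif i > 0 and phones[i - 1] in string.punctuation and phones[i] == ' ':
--             continue
--         new_phones.append(phones[i])
--     return new_phones
-- ===== SOURCE B (Python) =====
-- import string
--
-- def remove_space_around_punctuation(phones):
--     prevs = [None] + phones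
--     nexts = phones[1:] + [None]
--     return [p for q, p, r in zip(prevs, phones, nexts)
--             if not (p == ' ' and ((q is not None and q in string.punctuation)
--                                   or (r is not None and r in string.punctuation)))]
-- ===== Notes on version B (the rewrite author's own statement) =====
-- stated objective: simpler
-- what changed: A builds the output mutably, deleting a trailing space backwards when it meets punctuation and skipping via continue; B is a single non-mutating comprehension over zip of each token with its two original neighbours, deciding each token locally with no list mutation or back-reference.
import Mathlib
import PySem

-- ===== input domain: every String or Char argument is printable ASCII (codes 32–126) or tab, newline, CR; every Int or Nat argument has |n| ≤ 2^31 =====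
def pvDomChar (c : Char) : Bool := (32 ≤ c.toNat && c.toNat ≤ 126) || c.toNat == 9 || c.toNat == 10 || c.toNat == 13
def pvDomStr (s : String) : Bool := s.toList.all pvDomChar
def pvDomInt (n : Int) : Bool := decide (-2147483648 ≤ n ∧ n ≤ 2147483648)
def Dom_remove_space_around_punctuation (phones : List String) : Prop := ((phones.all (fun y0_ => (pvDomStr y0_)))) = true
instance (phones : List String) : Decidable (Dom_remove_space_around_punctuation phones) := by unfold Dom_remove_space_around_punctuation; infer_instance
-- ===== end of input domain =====

-- B replaces A's build-then-delete-backward loop with a single non-mutating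
-- comprehension deciding each token from its two original neighbours (objective: simpler).

-- string.punctuation; 'tok in string.punctuation' is Python substring membership (PySem.Str.isIn)
def pvPunct : String := "!\"#$%&'()*+,-./:;<=>?@[\\]^_`{|}~"

def pvIsPunct (s : String) : Bool := PySem.Str.isIn s pvPunct

-- ===== PORT A =====
-- A's loop over i in range(len(phones)); the growing Python list new_phones is kept
-- reversed (append = cons, new_phones[-1] = head, del new_phones[-1] = tail) and
-- reversed back at the end; prev carries phones[i-1] (none at i = 0).
def pvLoopA (prev : Option String) (acc : List String) : List String → List String
  | [] => acc.reverse
  | x :: rest =>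
    if pvIsPunct x then
      pvLoopA (some x) (x :: (if acc.head? == some " " then acc.tail else acc)) rest
    else if (match prev with | some p => pvIsPunct p | none => false) && x == " " then
      pvLoopA (some x) acc rest
    else
      pvLoopA (some x) (x :: acc) rest

def remove_space_around_punctuation (phones : List String) : List String :=
  pvLoopA none [] phones

-- ===== PORT B =====
-- B: [p for q, p, r in zip([None]+phones, phones, phones[1:]+[None]) if not (p==' ' and (q punct or r punct))]
def pvOptPunct (o : Option String) : Bool :=
  match o with | some s => pvIsPunct s | none => false

def remove_space_around_punctuation_alt (phones : List String) : List String :=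
  (((none :: phones.map some).zip phones).zip ((phones.drop 1).map some ++ [none])).filterMap
    (fun qpr => if qpr.1.2 = " " ∧ (pvOptPunct qpr.1.1 ∨ pvOptPunct qpr.2) then none else some qpr.1.2)

-- ===== PRECONDITION & SPEC =====
def Spec_remove_space_around_punctuation (phones : List String) (out : List String) : Prop := out = remove_space_around_punctuation_alt phones
instance (phones : List String) (out : List String) : Decidable (Spec_remove_space_around_punctuation phones out) := by unfold Spec_remove_space_around_punctuation; infer_instance

-- ===== CLAIM (what is proved, stated in full; the proofs are below) =====
def Claim_equal_remove_space_around_punctuation : Prop := ∀ (phones : List String), Dom_remove_space_around_punctuation phones → Spec_remove_space_around_punctuation phones (remove_space_around_punctuation phones)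

-- ===== LEMMAS AND PROOFS =====

-- B's zip comprehension, generalized over the first "previous" entry
def pvZipForm (prev : Option String) (l : List String) : List String :=
  (((prev :: l.map some).zip l).zip ((l.drop 1).map some ++ [none])).filterMap
    (fun qpr => if qpr.1.2 = " " ∧ (pvOptPunct qpr.1.1 ∨ pvOptPunct qpr.2) then none else some qpr.1.2)

lemma pvOptPunct_none : pvOptPunct none = false := rfl

lemma pvOptPunct_some (s : String) : pvOptPunct (some s) = pvIsPunct s := rfl

lemma pvZipForm_nil (prev : Option String) : pvZipForm prev [] = [] := rfl

lemma pvZipForm_cons (prev : Option String) (x : String) (rest : List String) :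
    pvZipForm prev (x :: rest) =
      (if x = " " ∧ (pvOptPunct prev ∨ pvOptPunct rest.head?) then [] else [x])
        ++ pvZipForm (some x) rest := by
  cases rest with
  | nil =>
    by_cases hc : x = " " ∧ (pvOptPunct prev = true ∨ pvOptPunct (none : Option String) = true)
    · simp [pvZipForm, hc]
    · simp [pvZipForm, hc]
  | cons y rs =>
    by_cases hc : x = " " ∧ (pvOptPunct prev = true ∨ pvOptPunct (some y) = true)
    · simp [pvZipForm, hc]
    · simp [pvZipForm, hc]

lemma pvLoopA_nil (prev : Option String) (acc : List String) :
    pvLoopA prev acc [] = acc.reverse := rfl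

lemma pvLoopA_cons (prev : Option String) (acc : List String) (x : String) (rest : List String) :
    pvLoopA prev acc (x :: rest) =
      (if pvIsPunct x then
        pvLoopA (some x) (x :: (if acc.head? == some " " then acc.tail else acc)) rest
      else if pvOptPunct prev && x == " " then
        pvLoopA (some x) acc rest
      else
        pvLoopA (some x) (x :: acc) rest) := by
  cases prev <;> rfl

lemma pvIsPunct_space : pvIsPunct " " = false := by decide

lemma pvLoopA_eq (l : List String) : ∀ (prev : Option String) (acc : List String),
    (acc.head? = some " " → prev = some " ") →
    pvLoopA prev acc l =
      (if pvOptPunct l.head? = true ∧ acc.head? = some " " then acc.tail else acc).reverse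
        ++ pvZipForm prev l := by
  induction l with
  | nil =>
    intro prev acc _
    simp [pvLoopA_nil, pvZipForm_nil, pvOptPunct_none]
  | cons x rest ih =>
    intro prev acc H
    rw [pvLoopA_cons, pvZipForm_cons]
    by_cases hx : pvIsPunct x = true
    · -- punct branch: delete a trailing " ", then append x
      have hxs : x ≠ " " := by rintro rfl; rw [pvIsPunct_space] at hx; exact absurd hx (by simp)
      rw [if_pos hx]
      rw [ih (some x) (x :: (if acc.head? == some " " then acc.tail else acc))
            (by intro h; simp at h; exact absurd h hxs)]
      by_cases ha : acc.head? = some " "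
      · simp [pvOptPunct_some, ha, hx, hxs]
      · simp [pvOptPunct_some, ha, hx, hxs]
    · rw [if_neg (by simp [hx])]
      by_cases hskip : (pvOptPunct prev && x == " ") = true
      · -- skip branch: prev is punctuation and x = " "
        rw [if_pos hskip]
        have hxsp : x = " " := by
          have := (Bool.and_eq_true _ _).mp hskip |>.2; simpa using this
        have hprev : pvOptPunct prev = true := (Bool.and_eq_true _ _).mp hskip |>.1
        have haccns : ¬ acc.head? = some " " := by
          intro h'
          have hp := H h'
          rw [hp, pvOptPunct_some, pvIsPunct_space] at hprev
          exact absurd hprev (by simp)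
        rw [ih (some x) acc (by intro h; rw [hxsp])]
        subst hxsp
        simp [haccns, hprev, pvOptPunct_some, pvIsPunct_space]
      · -- plain append branch
        rw [if_neg hskip]
        rw [ih (some x) (x :: acc) (by intro h; simp at h; rw [h])]
        by_cases hxsp : x = " "
        · subst hxsp
          have hnp : pvOptPunct prev = false := by
            cases hp : pvOptPunct prev with
            | false => rfl
            | true => exact absurd (by simp [hp]) hskip
          by_cases hr : pvOptPunct rest.head? = true
          · simp [pvOptPunct_some, hnp, hr, pvIsPunct_space]
          · simp [pvOptPunct_some, hnp, hr, pvIsPunct_space]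
        · simp [pvOptPunct_some, hxsp, hx]

-- ===== VERDICT (by name: the statement is the Claim_ definition above) =====
theorem remove_space_around_punctuation_spec : Claim_equal_remove_space_around_punctuation := by
  intro phones _
  show remove_space_around_punctuation phones = remove_space_around_punctuation_alt phones
  rw [remove_space_around_punctuation, pvLoopA_eq phones none [] (by intro h; simp at h)]
  simp only [List.head?_nil]
  norm_num
  rfl
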